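-- pv_equiv track=rewrite | github.com/kai-git-stuff/AmpliTF | tests/amplitude_model.py | helicity_options
-- ===== SOURCE A (Python) =====
-- def helicity_options(J,s1,s2,s3):
--     options = []
--     for m1 in range(-s1,s1+1,2):
--         for m2 in range(-s2,s2+1,2):
--             for m3 in range(-s3,s3+1,2):
--                 if m1+m2+m3 <= J:
--                     options.append((m1,m2,m3))
--     return options
-- ===== SOURCE B (Python) =====
-- def helicity_options(J, s1, s2, s3):
--     n1 = max(s1 + 1, 0)
--     n2 = max(s2 + 1, 0)
--     out = []
--     for i in range(n1 * n2):
--         q, r = divmod(i, n2)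
--         m1 = 2 * q - s1
--         m2 = 2 * r - s2
--         hi = min(s3, J - m1 - m2)
--         m3 = -s3
--         while m3 <= hi:
--             out.append((m1, m2, m3))
--             m3 += 2
--     return out
-- ===== Notes on version B (the rewrite author's own statement) =====
-- stated objective: alternative
-- what changed: The three nested for-loops with an inner membership test are replaced by a single flat loop over a linearised (m1,m2) index decoded with divmod, and the admissible m3 values are emitted by a while-loop that stops at the closed-form upper bound instead of testing each candidate.
import Mathlib
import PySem

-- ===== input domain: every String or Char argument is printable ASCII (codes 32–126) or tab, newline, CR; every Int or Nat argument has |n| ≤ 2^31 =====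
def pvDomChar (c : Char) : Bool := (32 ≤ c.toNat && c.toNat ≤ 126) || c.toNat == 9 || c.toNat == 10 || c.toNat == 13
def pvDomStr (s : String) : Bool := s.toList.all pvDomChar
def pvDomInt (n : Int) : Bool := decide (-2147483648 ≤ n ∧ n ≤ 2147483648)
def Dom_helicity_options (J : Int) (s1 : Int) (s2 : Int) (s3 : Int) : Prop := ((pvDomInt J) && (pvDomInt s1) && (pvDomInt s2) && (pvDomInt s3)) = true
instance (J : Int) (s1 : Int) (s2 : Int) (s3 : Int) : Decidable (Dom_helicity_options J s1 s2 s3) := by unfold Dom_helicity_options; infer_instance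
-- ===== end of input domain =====

-- B replaces the three nested for-loops with an inner test by one flat loop over a linearised
-- (m1,m2) index decoded with divmod, plus a while-loop emitting the admissible m3 run directly
-- (objective: alternative).

-- ===== PORT A =====
def helicity_options (J : Int) (s1 : Int) (s2 : Int) (s3 : Int) : List (Int × Int × Int) :=
  (PySem.List.pyRange (-s1) (s1 + 1) 2).foldl (fun options m1 =>
    (PySem.List.pyRange (-s2) (s2 + 1) 2).foldl (fun options m2 =>
      (PySem.List.pyRange (-s3) (s3 + 1) 2).foldl (fun options m3 =>
        if m1 + m2 + m3 ≤ J then options ++ [(m1, m2, m3)] else options) options) options) []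

-- ===== PORT B =====
-- the 'while m3 <= hi: out.append(...); m3 += 2' loop of Source B
def pvWhile (m1 m2 hi m3 : Int) (out : List (Int × Int × Int)) : List (Int × Int × Int) :=
  if m3 ≤ hi then pvWhile m1 m2 hi (m3 + 2) (out ++ [(m1, m2, m3)]) else out
termination_by (hi + 1 - m3).toNat
decreasing_by omega

def helicity_options_alt (J : Int) (s1 : Int) (s2 : Int) (s3 : Int) : List (Int × Int × Int) :=
  let n1 := max (s1 + 1) 0
  let n2 := max (s2 + 1) 0
  (PySem.List.pyRange 0 (n1 * n2) 1).foldl (fun out i =>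
    let q := PySem.Int.floordiv i n2
    let r := PySem.Int.mod i n2
    let m1 := 2 * q - s1
    let m2 := 2 * r - s2
    pvWhile m1 m2 (min s3 (J - m1 - m2)) (-s3) out) []

-- ===== PRECONDITION & SPEC =====
def Spec_helicity_options (J : Int) (s1 : Int) (s2 : Int) (s3 : Int) (out : List (Int × Int × Int)) : Prop := out = helicity_options_alt J s1 s2 s3
instance (J : Int) (s1 : Int) (s2 : Int) (s3 : Int) (out : List (Int × Int × Int)) : Decidable (Spec_helicity_options J s1 s2 s3 out) := by unfold Spec_helicity_options; infer_instance

-- ===== CLAIM (what is proved, stated in full; the proofs are below) =====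
def Claim_equal_helicity_options : Prop := ∀ (J : Int) (s1 : Int) (s2 : Int) (s3 : Int), Dom_helicity_options J s1 s2 s3 → Spec_helicity_options J s1 s2 s3 (helicity_options J s1 s2 s3)

-- ===== LEMMAS AND PROOFS =====

-- A foldl whose body appends a block is a flatMap.
theorem pv_foldl_extend {α β : Type} {l : List α} {f : List β → α → List β} (g : α → List β)
    (h : ∀ acc x, f acc x = acc ++ g x) : ∀ acc, l.foldl f acc = acc ++ l.flatMap g := by
  induction l with
  | nil => intro acc; simp
  | cons x xs ih =>
    intro acc
    simp only [List.foldl_cons, h, List.flatMap_cons, ih, List.append_assoc]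

-- flatMap congruence on members
theorem pv_flatMap_congr {α β : Type} {l : List α} {f g : α → List β}
    (h : ∀ x ∈ l, f x = g x) : l.flatMap f = l.flatMap g := by
  induction l with
  | nil => rfl
  | cons x xs ih =>
    simp only [List.flatMap_cons, h x (List.mem_cons_self), ih (fun y hy => h y (List.mem_cons_of_mem _ hy))]

-- decoding a flat range(N1*N2) index with div/mod yields the two nested ranges
theorem pv_index {α : Type} (N1 N2 : Nat) (g : Nat → Nat → List α) :
    (List.range (N1 * N2)).flatMap (fun i => g (i / N2) (i % N2))
      = (List.range N1).flatMap (fun q => (List.range N2).flatMap (fun r => g q r)) := by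
  induction N1 with
  | zero => simp
  | succ N1 ih =>
    rcases Nat.eq_zero_or_pos N2 with h0 | hpos
    · simp [h0]
    · have hsplit : (N1 + 1) * N2 = N1 * N2 + N2 := by ring
      rw [hsplit, List.range_add, List.flatMap_append, ih, List.range_succ, List.flatMap_append,
        List.flatMap_map]
      congr 1
      have hbody : ∀ j ∈ List.range N2,
          g ((N1 * N2 + j) / N2) ((N1 * N2 + j) % N2) = g N1 j := by
        intro j hj
        have hjlt : j < N2 := List.mem_range.mp hj
        have hd : (N1 * N2 + j) / N2 = N1 := by
          simp [Nat.mul_comm N1 N2, Nat.mul_add_div hpos, Nat.div_eq_of_lt hjlt]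
        have hm : (N1 * N2 + j) % N2 = j := by
          simp [Nat.mul_comm N1 N2, Nat.mod_eq_of_lt hjlt]
        rw [hd, hm]
      rw [pv_flatMap_congr hbody]
      simp

-- a pyRange with step 2 from -s to s+1 as a Nat range
theorem pv_range2 (s : Int) :
    PySem.List.pyRange (-s) (s + 1) 2
      = (List.range (s + 1).toNat).map (fun k : Nat => -s + 2 * (k : Int)) := by
  have h2 : (0:Int) < 2 := by norm_num
  rw [PySem.List.pyRange_of_pos _ _ h2]
  have hN : (if -s < s + 1 then ((s + 1 - -s + 2 - 1) / 2).toNat else 0) = (s + 1).toNat := by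
    split_ifs with h <;> omega
  rw [hN]

-- Filtering an initial-segment predicate out of List.range.
theorem pv_filter_range_lt (N K : Nat) :
    (List.range N).filter (fun k => decide (k < K)) = List.range (min N K) := by
  induction N with
  | zero => simp
  | succ N ih =>
    rw [List.range_succ, List.filter_append, ih]
    by_cases h : N < K
    · have : min N K = N := by omega
      have h2 : min (N + 1) K = N + 1 := by omega
      simp [this, h, List.range_succ]
    · have : min N K = K := by omega
      have h2 : min (N + 1) K = K := by omega
      simp [this, h2, h]

-- A's inner loop, filtered, is exactly the initial run of m3 values up to the closed-form bound.
theorem pv_inner (J m1 m2 s3 : Int) :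
    ((PySem.List.pyRange (-s3) (s3 + 1) 2).filter (fun m3 => decide (m1 + m2 + m3 ≤ J)))
      = (List.range ((min s3 (J - m1 - m2) + s3) / 2 + 1).toNat).map
          (fun k : Nat => -s3 + 2 * (k : Int)) := by
  rw [pv_range2, List.filter_map]
  by_cases hs : 0 ≤ s3
  · rw [List.filter_congr (q := fun k : Nat =>
        decide (k < ((min s3 (J - m1 - m2) + s3) / 2 + 1).toNat))
      (by
        intro k hk
        have hk' : k < (s3 + 1).toNat := List.mem_range.mp hk
        simp only [Function.comp, decide_eq_decide]
        omega)]
    rw [pv_filter_range_lt]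
    have hmin : min (s3 + 1).toNat ((min s3 (J - m1 - m2) + s3) / 2 + 1).toNat
        = ((min s3 (J - m1 - m2) + s3) / 2 + 1).toNat := by omega
    rw [hmin]
  · have h1 : (s3 + 1).toNat = 0 := by omega
    have h2 : ((min s3 (J - m1 - m2) + s3) / 2 + 1).toNat = 0 := by omega
    rw [h1, h2]
    simp

-- the while loop emits exactly the run m3, m3+2, … while ≤ hi
theorem pv_while_eq (m1 m2 hi : Int) : ∀ m3 out,
    pvWhile m1 m2 hi m3 out
      = out ++ (List.range ((hi - m3) / 2 + 1).toNat).map (fun k : Nat => (m1, m2, m3 + 2 * (k : Int))) := by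
  intro m3 out
  induction m3, out using pvWhile.induct m1 m2 hi with
  | case1 m3 out hle ih =>
    rw [pvWhile, if_pos hle, ih]
    have hc : ((hi - m3) / 2 + 1).toNat = ((hi - (m3 + 2)) / 2 + 1).toNat + 1 := by omega
    rw [hc, List.range_succ_eq_map, List.map_cons, List.map_map, List.append_assoc]
    congr 1
    rw [List.singleton_append]
    congr 1
    · simp
    · apply List.map_congr_left
      intro k _
      simp only [Function.comp_apply, Prod.mk.injEq, true_and]
      push_cast
      ring
  | case2 m3 out hle =>
    rw [pvWhile, if_neg hle]
    have h0 : ((hi - m3) / 2 + 1).toNat = 0 := by omega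
    simp [h0]

-- ===== VERDICT (by name: the statement is the Claim_ definition above) =====
theorem helicity_options_spec : Claim_equal_helicity_options := by
  intro J s1 s2 s3 _
  unfold Spec_helicity_options
  simp only [helicity_options, helicity_options_alt]
  -- A as a nested flatMap
  rw [pv_foldl_extend
      (g := fun m1 => (PySem.List.pyRange (-s2) (s2 + 1) 2).flatMap (fun m2 =>
        ((PySem.List.pyRange (-s3) (s3 + 1) 2).filter (fun m3 => decide (m1 + m2 + m3 ≤ J))).map
          (fun m3 => (m1, m2, m3))))
      (fun acc m1 => pv_foldl_extend _
        (fun acc' m2 => PySem.List.foldl_append_ite _ _ _ _) acc)]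
  -- B as a flat flatMap over the linear index
  rw [pv_foldl_extend
      (g := fun i =>
        (List.range ((min s3 (J - (2 * PySem.Int.floordiv i (max (s2 + 1) 0) - s1)
              - (2 * PySem.Int.mod i (max (s2 + 1) 0) - s2)) - -s3) / 2 + 1).toNat).map
          (fun k : Nat => (2 * PySem.Int.floordiv i (max (s2 + 1) 0) - s1,
            2 * PySem.Int.mod i (max (s2 + 1) 0) - s2, -s3 + 2 * (k : Int))))
      (fun acc i => pv_while_eq _ _ _ (-s3) acc)]
  simp only [List.nil_append]
  -- ranges to Nat form
  have e1 : max (s1 + 1) 0 = ((s1 + 1).toNat : Int) := by omega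
  have e2 : max (s2 + 1) 0 = ((s2 + 1).toNat : Int) := by omega
  rw [e1, e2, show ((s1 + 1).toNat : Int) * ((s2 + 1).toNat : Int)
      = (((s1 + 1).toNat * (s2 + 1).toNat : Nat) : Int) by push_cast; ring,
    PySem.List.pyRange_zero_natCast, List.flatMap_map]
  simp only [PySem.Int.floordiv_natCast, PySem.Int.mod_natCast]
  have hidx := pv_index (s1 + 1).toNat (s2 + 1).toNat
      (fun q r => (List.range ((min s3 (J - (2 * (q : Int) - s1) - (2 * (r : Int) - s2)) - -s3) / 2
          + 1).toNat).map
        (fun k : Nat => (2 * (q : Int) - s1, 2 * (r : Int) - s2, -s3 + 2 * (k : Int))))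
  simp only [] at hidx
  rw [hidx]
  -- A side: unfold its ranges and inner filter
  simp only [pv_inner]
  simp only [pv_range2, List.flatMap_map, List.map_map]
  -- pointwise agreement of the two nested flatMaps
  apply pv_flatMap_congr
  intro q _
  apply pv_flatMap_congr
  intro r _
  have hc : ((min s3 (J - (-s1 + 2 * (q : Int)) - (-s2 + 2 * (r : Int))) + s3) / 2 + 1).toNat
      = ((min s3 (J - (2 * (q : Int) - s1) - (2 * (r : Int) - s2)) - -s3) / 2 + 1).toNat := by
    have h : J - (-s1 + 2 * (q : Int)) - (-s2 + 2 * (r : Int))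
        = J - (2 * (q : Int) - s1) - (2 * (r : Int) - s2) := by ring
    rw [h]
    omega
  rw [hc]
  apply List.map_congr_left
  intro k _
  simp only [Function.comp_apply, Prod.mk.injEq, and_true]
  exact ⟨by ring, by ring⟩
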